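-- pv_equiv track=rewrite | github.com/xiaojitui/nlp_ner | extract_ner_from_txt.py | find_seg
-- ===== SOURCE A (Python) =====
-- def find_seg(s_indx, e_indx, delta):
--
--     segs = []
--     for i in s_indx:
--         for j in e_indx:
--             if j > i:
--                 segs.append([i+delta, j])
--                 break
--     return segs
-- ===== SOURCE B (Python) =====
-- def find_seg(s_indx, e_indx, delta):
--     # End-driven matching: consume e_indx in order, assigning each end to all
--     # still-pending starts it closes; one pass over each end list element.
--     result = [None] * len(s_indx)
--     pending = list(range(len(s_indx)))
--     for j in e_indx:
--         still = []
--         for p in pending: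
--             if s_indx[p] < j:
--                 result[p] = [s_indx[p] + delta, j]
--             else:
--                 still.append(p)
--         pending = still
--     return [r for r in result if r is not None]
-- ===== Notes on version B (the rewrite author's own statement) =====
-- stated objective: alternative
-- what changed: Instead of scanning e_indx from the top for every start, B iterates the ends in order once, keeping a pending list of unmatched start positions and a position-indexed result array; each start slot is written exactly when its first later end arrives, then slots are collected in position order.
import Mathlib
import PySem

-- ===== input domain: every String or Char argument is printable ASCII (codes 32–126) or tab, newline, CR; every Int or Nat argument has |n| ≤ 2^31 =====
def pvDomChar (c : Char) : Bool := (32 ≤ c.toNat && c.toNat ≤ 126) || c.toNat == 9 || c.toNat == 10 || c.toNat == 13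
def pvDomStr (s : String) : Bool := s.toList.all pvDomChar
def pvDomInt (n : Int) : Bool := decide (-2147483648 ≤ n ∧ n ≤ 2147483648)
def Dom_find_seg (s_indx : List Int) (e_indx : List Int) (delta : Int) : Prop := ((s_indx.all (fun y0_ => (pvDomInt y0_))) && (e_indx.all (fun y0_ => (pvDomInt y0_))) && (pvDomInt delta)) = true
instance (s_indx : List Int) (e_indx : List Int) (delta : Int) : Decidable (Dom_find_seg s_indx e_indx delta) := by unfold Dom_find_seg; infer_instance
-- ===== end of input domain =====

-- B replaces A's per-start rescans of e_indx with one end-driven pass keeping pending start positions (alternative decomposition; no speed claim).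


-- ===== PORT A =====
-- inner 'for j in e_indx: if j > i: segs.append(...); break'
def innerA (segs : List (List Int)) (i : Int) (delta : Int) : List Int → List (List Int)
  | [] => segs
  | j :: js => if j > i then segs ++ [[i + delta, j]] else innerA segs i delta js

def find_seg (s_indx : List Int) (e_indx : List Int) (delta : Int) : List (List Int) :=
  s_indx.foldl (fun segs i => innerA segs i delta e_indx) []

-- ===== PORT B =====
-- one pass over pending positions for a single end j: write matched slots, keep the rest
def passOne (s : List Int) (delta : Int) (j : Int) :
    List Nat → List (Option (List Int)) → List Nat × List (Option (List Int))
  | [], result => ([], result)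
  | p :: ps, result =>
      if s.getD p 0 < j then passOne s delta j ps (result.set p (some [s.getD p 0 + delta, j]))
      else
        let r := passOne s delta j ps result
        (p :: r.1, r.2)

-- outer 'for j in e_indx' loop over the (pending, result) state
def altLoop (s : List Int) (delta : Int) :
    List Int → List Nat → List (Option (List Int)) → List (Option (List Int))
  | [], _, result => result
  | j :: js, pending, result =>
      let st := passOne s delta j pending result
      altLoop s delta js st.1 st.2

def find_seg_alt (s_indx : List Int) (e_indx : List Int) (delta : Int) : List (List Int) :=
  (altLoop s_indx delta e_indx (List.range s_indx.length)
      (List.replicate s_indx.length none)).filterMap id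

-- ===== PRECONDITION & SPEC =====
def Spec_find_seg (s_indx : List Int) (e_indx : List Int) (delta : Int) (out : List (List Int)) : Prop := out = find_seg_alt s_indx e_indx delta
instance (s_indx : List Int) (e_indx : List Int) (delta : Int) (out : List (List Int)) : Decidable (Spec_find_seg s_indx e_indx delta out) := by unfold Spec_find_seg; infer_instance

-- ===== CLAIM (what is proved, stated in full; the proofs are below) =====
def Claim_equal_find_seg : Prop := ∀ (s_indx : List Int) (e_indx : List Int) (delta : Int), Dom_find_seg s_indx e_indx delta → Spec_find_seg s_indx e_indx delta (find_seg s_indx e_indx delta)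

-- ===== LEMMAS AND PROOFS =====

-- first end of e strictly greater than i, in e's order
def firstEnd (i : Int) : List Int → Option Int
  | [] => none
  | j :: js => if j > i then some j else firstEnd i js

theorem innerA_eq (i delta : Int) (e : List Int) :
    ∀ segs : List (List Int),
      innerA segs i delta e =
        segs ++ ((firstEnd i e).elim [] (fun j => [[i + delta, j]])) := by
  induction e with
  | nil => intro segs; simp [innerA, firstEnd]
  | cons j js ih =>
      intro segs
      by_cases h : j > i
      · simp [innerA, firstEnd, h]
      · simp [innerA, firstEnd, h, ih]

theorem find_seg_eq_flatMap (s e : List Int) (delta : Int) :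
    find_seg s e delta =
      s.flatMap (fun i => (firstEnd i e).elim [] (fun j => [[i + delta, j]])) := by
  unfold find_seg
  induction s using List.reverseRecOn with
  | nil => simp
  | append_singleton s i ih =>
      rw [List.foldl_append, List.flatMap_append, ← ih]
      simp [innerA_eq]

theorem passOne_fst (s : List Int) (delta j : Int) :
    ∀ (ps : List Nat) (result : List (Option (List Int))),
      (passOne s delta j ps result).1 = ps.filter (fun p => !decide (s.getD p 0 < j)) := by
  intro ps
  induction ps with
  | nil => intro result; simp [passOne]
  | cons p ps ih =>
      intro result
      simp only [passOne]
      by_cases h : s.getD p 0 < j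
      · have h' := h; rw [List.getD_eq_getElem?_getD] at h'
        rw [if_pos h, ih, List.filter_cons]
        simp [h']
      · have h' := h; rw [List.getD_eq_getElem?_getD] at h'
        rw [if_neg h, List.filter_cons]
        simp [h', ih]

theorem passOne_length (s : List Int) (delta j : Int) :
    ∀ (ps : List Nat) (result : List (Option (List Int))),
      (passOne s delta j ps result).2.length = result.length := by
  intro ps
  induction ps with
  | nil => intro result; simp [passOne]
  | cons p ps ih =>
      intro result
      simp only [passOne]
      by_cases h : s.getD p 0 < j
      · rw [if_pos h, ih]; simp
      · rw [if_neg h]; exact ih result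

theorem passOne_getD (s : List Int) (delta j : Int) (q : Nat) :
    ∀ (ps : List Nat) (result : List (Option (List Int))), q < result.length →
      (passOne s delta j ps result).2.getD q none =
        if q ∈ ps ∧ s.getD q 0 < j then some [s.getD q 0 + delta, j]
        else result.getD q none := by
  intro ps
  induction ps with
  | nil => intro result _; simp [passOne]
  | cons p ps ih =>
      intro result hq
      simp only [passOne]
      by_cases h : s.getD p 0 < j
      · rw [if_pos h]
        rw [ih _ (by simp; omega)]
        by_cases hmem : q ∈ ps ∧ s.getD q 0 < j
        · rw [if_pos hmem, if_pos ⟨List.mem_cons_of_mem _ hmem.1, hmem.2⟩]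
        · rw [if_neg hmem]
          by_cases hpq : q = p
          · subst hpq
            have hset : (result.set q (some [s.getD q 0 + delta, j])).getD q none
                = some [s.getD q 0 + delta, j] := by
              rw [List.getD_eq_getElem?_getD, List.getElem?_set_self (by omega)]
              rfl
            rw [hset, if_pos ⟨List.mem_cons_self, h⟩]
          · have hset : (result.set p (some [s.getD p 0 + delta, j])).getD q none
                = result.getD q none := by
              rw [List.getD_eq_getElem?_getD, List.getElem?_set_ne (Ne.symm hpq),
                  List.getD_eq_getElem?_getD]
            rw [hset]
            have : ¬ (q ∈ p :: ps ∧ s.getD q 0 < j) := by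
              rintro ⟨hm, hlt⟩
              rcases List.mem_cons.mp hm with h1 | h1
              · exact hpq h1
              · exact hmem ⟨h1, hlt⟩
            rw [if_neg this]
      · rw [if_neg h]
        rw [ih _ hq]
        by_cases hmem : q ∈ ps ∧ s.getD q 0 < j
        · rw [if_pos hmem, if_pos ⟨List.mem_cons_of_mem _ hmem.1, hmem.2⟩]
        · rw [if_neg hmem]
          have : ¬ (q ∈ p :: ps ∧ s.getD q 0 < j) := by
            rintro ⟨hm, hlt⟩
            rcases List.mem_cons.mp hm with h1 | h1
            · exact h (h1 ▸ hlt)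
            · exact hmem ⟨h1, hlt⟩
          rw [if_neg this]

theorem altLoop_length (s : List Int) (delta : Int) :
    ∀ (e : List Int) (pending : List Nat) (result : List (Option (List Int))),
      (altLoop s delta e pending result).length = result.length := by
  intro e
  induction e with
  | nil => intro pending result; simp [altLoop]
  | cons j js ih =>
      intro pending result
      simp only [altLoop]
      rw [ih, passOne_length]

theorem altLoop_getD (s : List Int) (delta : Int) (q : Nat) :
    ∀ (e : List Int) (pending : List Nat) (result : List (Option (List Int))),
      q < result.length →
      (altLoop s delta e pending result).getD q none =
        if q ∈ pending then
          (firstEnd (s.getD q 0) e).elim (result.getD q none)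
            (fun j => some [s.getD q 0 + delta, j])
        else result.getD q none := by
  intro e
  induction e with
  | nil =>
      intro pending result _
      simp only [altLoop, firstEnd, Option.elim]
      split <;> rfl
  | cons j js ih =>
      intro pending result hq
      simp only [altLoop]
      rw [ih _ _ (by rw [passOne_length]; exact hq)]
      rw [passOne_fst, passOne_getD _ _ _ _ _ _ hq]
      by_cases hmem : q ∈ pending
      · by_cases hlt : s.getD q 0 < j
        · have hlt' := hlt; rw [List.getD_eq_getElem?_getD] at hlt'
          have hnot : q ∉ pending.filter (fun p => !decide (s.getD p 0 < j)) := by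
            simp [List.mem_filter, hlt']
          rw [if_neg hnot, if_pos ⟨hmem, hlt⟩, if_pos hmem]
          simp only [firstEnd]
          rw [if_pos hlt]
          rfl
        · have hlt' := hlt; rw [List.getD_eq_getElem?_getD] at hlt'
          have hin : q ∈ pending.filter (fun p => !decide (s.getD p 0 < j)) := by
            simp [List.mem_filter, hlt', hmem]
          rw [if_pos hin, if_pos hmem]
          have : ¬ (q ∈ pending ∧ s.getD q 0 < j) := fun hc => hlt hc.2
          rw [if_neg this]
          simp only [firstEnd]
          rw [if_neg hlt]
      · have hnot : q ∉ pending.filter (fun p => !decide (s.getD p 0 < j)) := by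
          intro hc
          exact hmem (List.mem_of_mem_filter hc)
        have : ¬ (q ∈ pending ∧ s.getD q 0 < j) := fun hc => hmem hc.1
        rw [if_neg hnot, if_neg this, if_neg hmem]

theorem altLoop_result (s : List Int) (delta : Int) (e : List Int) :
    altLoop s delta e (List.range s.length) (List.replicate s.length none) =
      (List.range s.length).map
        (fun q => (firstEnd (s.getD q 0) e).elim none
          (fun j => some [s.getD q 0 + delta, j])) := by
  apply List.ext_getElem
  · rw [altLoop_length]; simp
  · intro q h1 h2
    have hq : q < s.length := by
      have := altLoop_length s delta e (List.range s.length) (List.replicate s.length none)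
      rw [this] at h1; simpa using h1
    have hmem : q ∈ List.range s.length := List.mem_range.mpr hq
    have h := altLoop_getD s delta q e (List.range s.length)
      (List.replicate s.length none) (by simpa using hq)
    rw [if_pos hmem] at h
    rw [List.getD_eq_getElem _ _ h1] at h
    rw [h]
    have hrep : (List.replicate s.length (none : Option (List Int))).getD q none = none := by
      rw [List.getD_eq_getElem?_getD, List.getElem?_replicate]
      simp [hq]
    rw [hrep]
    rw [List.getElem_map, List.getElem_range]

theorem map_range_getD {β : Type} (s : List Int) (F : Int → β) :
    (List.range s.length).map (fun q => F (s.getD q 0)) = s.map F := by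
  apply List.ext_getElem
  · simp
  · intro q h1 h2
    simp only [List.getElem_map, List.getElem_range] at *
    rw [List.getD_eq_getElem _ _ (by simpa using h1)]

theorem filterMap_option_list {α β : Type} (s : List α) (F : α → Option β) :
    (s.map F).filterMap id = s.flatMap (fun i => (F i).elim [] (fun b => [b])) := by
  induction s with
  | nil => simp
  | cons a s ih =>
      simp only [List.map_cons, List.filterMap_cons, List.flatMap_cons, ← ih]
      cases h : F a <;> simp

-- ===== VERDICT (by name: the statement is the Claim_ definition above) =====
theorem find_seg_spec : Claim_equal_find_seg := by
  intro s e delta _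
  unfold Spec_find_seg find_seg_alt
  rw [altLoop_result]
  rw [map_range_getD s (fun i => (firstEnd i e).elim none (fun j => some [i + delta, j]))]
  rw [filterMap_option_list, find_seg_eq_flatMap]
  apply List.flatMap_congr
  intro i _
  cases firstEnd i e <;> simp
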